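-- pv_equiv track=rewrite | github.com/mattgu16/mtgu | media/wheel_of_misfortune.py | multiplier
-- ===== SOURCE A (Python) =====
-- def multiplier(phrase, letter, points):
--         histograms(phrase)
--         y=dict()
--         for z in phrase:
--                 if z not in y:
--                         y[z]=1
--                 else:
--                         y[z]=y[z]+1
--         keys=y.keys()
--         keys=list(keys)
--         keys.sort()
--         for e in keys:
--                 if e==letter:
--                         netpoints=y[e]*points
--                         a=y[e]
--                         return netpoints
--
-- def histograms(x): #finds occurence of each letter in phrase
--         y=dict()
--         for z in x:
--                 if z not in y:
--                         y[z]=1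
--                 else:
--                         y[z]=y[z]+1
--         return y
--         printhist(y)
--
-- def printhist(x):
--         keys=x.keys()
--         keys=list(keys)
--         keys.sort()
--         for e in keys:
--                 if e==letter:
--                         return(x[e])
-- ===== SOURCE B (Python) =====
-- def multiplier(phrase, letter, points):
--     # single scalar pass: no histogram dict, no key sort
--     n = 0
--     for ch in phrase:
--         if ch == letter:
--             n += 1
--     if n == 0:
--         return None
--     return n * points
-- ===== Notes on version B (the rewrite author's own statement) =====
-- stated objective: faster
-- what changed: B replaces A's full character-histogram dict, key extraction, key sort and sorted-key scan with a single integer counter incremented in one pass over the phrase, returning None iff the counter stays zero.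
import Mathlib
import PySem

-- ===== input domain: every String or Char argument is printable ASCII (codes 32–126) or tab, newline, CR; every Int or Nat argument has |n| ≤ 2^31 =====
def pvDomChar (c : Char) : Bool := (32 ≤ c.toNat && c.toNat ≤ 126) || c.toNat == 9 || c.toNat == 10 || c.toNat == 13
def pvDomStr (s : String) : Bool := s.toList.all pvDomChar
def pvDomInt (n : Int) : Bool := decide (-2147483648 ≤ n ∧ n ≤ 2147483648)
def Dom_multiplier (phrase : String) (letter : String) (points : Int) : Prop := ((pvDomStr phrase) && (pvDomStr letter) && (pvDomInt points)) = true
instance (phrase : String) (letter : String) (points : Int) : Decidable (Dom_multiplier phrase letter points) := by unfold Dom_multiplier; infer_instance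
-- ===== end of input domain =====

-- B replaces A's histogram-dict + key-sort + sorted-key scan by one counting pass; equivalence proved on all of Dom.

-- ===== PORT A =====
-- the sorted-key for-loop of A with its early return: first key equal to `letter`
-- (a Python char is a length-1 str, so `e==letter` is `String.ofList [e] = letter`);
-- `y[e]` is ported as getD _ 0: e is a key of y, so no KeyError is reachable
def multiplierScanA (y : PySem.Dict Char Int) (letter : String) (points : Int) : List Char → Option Int
  | [] => none
  | e :: rest =>
    if String.ofList [e] = letter then some (y.getD e 0 * points) else multiplierScanA y letter points rest

def multiplier (phrase : String) (letter : String) (points : Int) : Option Int :=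
  -- `histograms(phrase)` is called and its result discarded (pure, no effect on the output)
  let y := phrase.toList.foldl
    (fun d z => if d.contains z then d.insert z (d.getD z 0 + 1) else d.insert z 1)
    PySem.Dict.empty
  let keys := PySem.List.sorted y.keys (fun x => x) false
  multiplierScanA y letter points keys

-- ===== PORT B =====
def multiplier_alt (phrase : String) (letter : String) (points : Int) : Option Int :=
  let n : Int := phrase.toList.foldl (fun acc ch => if String.ofList [ch] = letter then acc + 1 else acc) 0
  if n = 0 then none else some (n * points)

-- ===== PRECONDITION & SPEC =====
def Spec_multiplier (phrase : String) (letter : String) (points : Int) (out : Option Int) : Prop := out = multiplier_alt phrase letter points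
instance (phrase : String) (letter : String) (points : Int) (out : Option Int) : Decidable (Spec_multiplier phrase letter points out) := by unfold Spec_multiplier; infer_instance

-- ===== CLAIM (what is proved, stated in full; the proofs are below) =====
def Claim_equal_multiplier : Prop := ∀ (phrase : String) (letter : String) (points : Int), Dom_multiplier phrase letter points → Spec_multiplier phrase letter points (multiplier phrase letter points)

-- ===== LEMMAS AND PROOFS =====

-- A's insert-or-increment dict step is exactly the Counter step
theorem pv_step_eq (d : PySem.Dict Char Int) (z : Char) :
    (if d.contains z then d.insert z (d.getD z 0 + 1) else d.insert z 1) = d.modify z 0 (fun v => v + 1) := by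
  simp only [PySem.Dict.modify, PySem.Dict.getD]
  by_cases h : d.contains z = true
  · simp [h]
  · simp only [h, Bool.false_eq_true, if_false]
    rw [PySem.Dict.contains_eq_isSome_get?] at h
    cases hg : d.get? z with
    | none => simp
    | some v => simp [hg] at h

theorem pv_fold_eq (chars : List Char) :
    chars.foldl (fun d z => if d.contains z then d.insert z (d.getD z 0 + 1) else d.insert z 1)
      PySem.Dict.empty = PySem.Dict.counter chars := by
  have hf : (fun (d : PySem.Dict Char Int) (z : Char) =>
      if d.contains z then d.insert z (d.getD z 0 + 1) else d.insert z 1)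
      = (fun (d : PySem.Dict Char Int) (z : Char) => d.modify z 0 (fun v => v + 1)) :=
    funext fun d => funext fun z => pv_step_eq d z
  rw [hf]; rfl

-- the early-return scan over any key list, when every matching key holds the same value n
theorem pv_scanA_eq (letter : String) (points n : Int) (y : PySem.Dict Char Int)
    (hy : ∀ e, String.ofList [e] = letter → y.getD e 0 = n) :
    ∀ l : List Char, multiplierScanA y letter points l
      = if ∃ e ∈ l, String.ofList [e] = letter then some (n * points) else none := by
  intro l
  induction l with
  | nil => simp [multiplierScanA]
  | cons e rest ih =>
    by_cases h : String.ofList [e] = letter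
    · simp [multiplierScanA, h, hy e h]
    · simp only [multiplierScanA, h, if_false, ih]
      simp [h]

-- B's counter is countP
theorem pv_alt_counter (chars : List Char) (letter : String) :
    chars.foldl (fun acc ch => if String.ofList [ch] = letter then acc + 1 else acc) (0 : Int)
      = (chars.countP (fun ch => decide (String.ofList [ch] = letter)) : Int) := by
  have := PySem.List.foldl_count_if (fun ch => decide (String.ofList [ch] = letter)) chars 0
  simpa using this

-- if some char matches letter, the count of that char is the countP of matching
theorem pv_mk_inj (x e : Char) : (String.ofList [x] = String.ofList [e]) ↔ x = e := by
  constructor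
  · intro h
    have := congrArg String.toList h
    simpa using this
  · intro h; rw [h]

theorem pv_count_eq_countP (chars : List Char) (letter : String) (e : Char)
    (he : String.ofList [e] = letter) :
    chars.count e = chars.countP (fun ch => decide (String.ofList [ch] = letter)) := by
  unfold List.count
  apply List.countP_congr
  intro x _
  subst he
  simp [pv_mk_inj]

-- membership in A's sorted key list is membership in the phrase
theorem pv_mem_keys (chars : List Char) (e : Char) :
    (e ∈ PySem.List.sorted (PySem.Dict.counter chars).keys (fun x => x) false) ↔ e ∈ chars := by
  rw [PySem.List.mem_sorted, PySem.Dict.keys_counter, PySem.Set.mem_ofList]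

-- ===== VERDICT (by name: the statement is the Claim_ definition above) =====
theorem multiplier_spec : Claim_equal_multiplier := by
  intro phrase letter points _
  unfold Spec_multiplier multiplier multiplier_alt
  rw [pv_fold_eq, pv_alt_counter]
  set chars := phrase.toList with hchars
  set m : Nat := chars.countP (fun ch => decide (String.ofList [ch] = letter)) with hm
  have hy : ∀ e, String.ofList [e] = letter → (PySem.Dict.counter chars).getD e 0 = (m : Int) := by
    intro e he
    rw [PySem.Dict.getD_counter, hm, pv_count_eq_countP chars letter e he]
  rw [pv_scanA_eq letter points (m : Int) _ hy]
  by_cases h : ∃ e ∈ PySem.List.sorted (PySem.Dict.counter chars).keys (fun x => x) false,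
      String.ofList [e] = letter
  · obtain ⟨e, hmem, he⟩ := h
    have hpos : 0 < m := by
      rw [hm]
      exact List.countP_pos_iff.mpr ⟨e, (pv_mem_keys chars e).mp hmem, by simp [he]⟩
    have hne : (m : Int) ≠ 0 := by exact_mod_cast hpos.ne'
    rw [if_pos ⟨e, hmem, he⟩, if_neg hne]
  · have hz : m = 0 := by
      rw [hm, List.countP_eq_zero]
      intro e hmem
      simp only [decide_eq_true_eq]
      intro he
      exact h ⟨e, (pv_mem_keys chars e).mpr hmem, he⟩
    rw [if_neg h]
    simp [hz]
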